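-- pv_equiv track=rewrite | github.com/laud1204/TDsPython | TD5/exercice1.py | premier_plateau
-- ===== SOURCE A (Python) =====
-- def premier_plateau(tableau):
--     longueur = 1
--     i = 1
--     tab = tableau[0]
--     while i < len(tableau):
--         if tab == tableau[i]:
--             longueur += 1
--         else:
--             return tab, longueur
--         i += 1
--     return tab, longueur
-- ===== SOURCE B (Python) =====
-- def premier_plateau(tableau):
--     # Run-length encode the ENTIRE list (no early exit), then report the first run.
--     runs = []
--     cur, cnt = tableau[0], 0
--     for x in tableau:
--         if x == cur:
--             cnt += 1
--         else:
--             runs.append((cur, cnt))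
--             cur, cnt = x, 1
--     runs.append((cur, cnt))
--     return runs[0]
-- ===== Notes on version B (the rewrite author's own statement) =====
-- stated objective: alternative
-- what changed: Replaces A's early-returning prefix scan with a run-length encoding of the whole list (current-run accumulator plus a list of finished runs), returning the first run.
import Mathlib
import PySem

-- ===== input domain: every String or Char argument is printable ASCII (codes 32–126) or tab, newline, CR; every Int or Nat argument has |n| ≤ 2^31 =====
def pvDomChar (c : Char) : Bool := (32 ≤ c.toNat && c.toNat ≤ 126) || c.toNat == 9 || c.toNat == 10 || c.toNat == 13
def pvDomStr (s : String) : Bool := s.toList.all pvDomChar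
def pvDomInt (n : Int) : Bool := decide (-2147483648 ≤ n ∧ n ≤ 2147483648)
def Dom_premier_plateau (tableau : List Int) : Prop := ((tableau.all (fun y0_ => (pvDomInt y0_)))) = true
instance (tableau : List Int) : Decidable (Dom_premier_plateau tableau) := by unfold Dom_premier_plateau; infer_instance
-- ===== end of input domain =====

-- B replaces A's early-returning prefix scan by a run-length encoding of the whole list
-- (current-run accumulator + list of finished runs), returning the first run; alternative, same order of cost.


-- ===== PORT A =====
-- A's while loop over indices 1..len-1: stops (returns) at the first element ≠ tab.
def premier_plateau_loop (tab : Int) (rest : List Int) (longueur : Int) : Int × Int :=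
  match rest with
  | [] => (tab, longueur)
  | x :: xs => if tab == x then premier_plateau_loop tab xs (longueur + 1) else (tab, longueur)

def premier_plateau (tableau : List Int) : Int × Int :=
  match tableau with
  | [] => (0, 0)   -- unreachable under Pre_: Python raises IndexError on tableau[0]
  | tab :: rest => premier_plateau_loop tab rest 1

-- ===== PORT B =====
-- one loop step of Source B: state (runs, cur, cnt)
def rleStep (st : List (Int × Int) × Int × Int) (x : Int) : List (Int × Int) × Int × Int :=
  let (runs, cur, cnt) := st
  if x == cur then (runs, cur, cnt + 1) else (runs ++ [(cur, cnt)], x, 1)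

def premier_plateau_alt (tableau : List Int) : Int × Int :=
  match tableau with
  | [] => (0, 0)   -- unreachable under Pre_: Python raises IndexError on tableau[0]
  | t0 :: _ =>
    let (runs, cur, cnt) := tableau.foldl rleStep ([], t0, 0)
    (runs ++ [(cur, cnt)]).headD (0, 0)   -- runs[0]; the list is nonempty, so headD never defaults

-- ===== PRECONDITION & SPEC =====
-- Pre_ excludes the empty list, on which A raises IndexError at tableau[0].
def Pre_premier_plateau (tableau : List Int) : Prop := tableau ≠ []
instance (tableau : List Int) : Decidable (Pre_premier_plateau tableau) := by unfold Pre_premier_plateau; infer_instance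
def pvWitness_premier_plateau : List Int := [3, 3, 1]

def Spec_premier_plateau (tableau : List Int) (out : Int × Int) : Prop := out = premier_plateau_alt tableau
instance (tableau : List Int) (out : Int × Int) : Decidable (Spec_premier_plateau tableau out) := by unfold Spec_premier_plateau; infer_instance

-- ===== CLAIM (what is proved, stated in full; the proofs are below) =====
def Claim_equal_premier_plateau : Prop := ∀ (tableau : List Int), Dom_premier_plateau tableau → Pre_premier_plateau tableau → Spec_premier_plateau tableau (premier_plateau tableau)

-- ===== LEMMAS AND PROOFS =====
-- A's loop counts the leading prefix equal to tab.
theorem premier_plateau_loop_eq (tab : Int) (xs : List Int) (acc : Int) :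
    premier_plateau_loop tab xs acc = (tab, acc + ((xs.takeWhile (fun x => x == tab)).length : Int)) := by
  induction xs generalizing acc with
  | nil => simp [premier_plateau_loop]
  | cons y ys ih =>
    simp only [premier_plateau_loop, List.takeWhile]
    by_cases h : y = tab
    · subst h
      simp [ih]
      ring
    · have h1 : (tab == y) = false := by simpa using fun hc => h hc.symm
      have h2 : (y == tab) = false := by simpa using h
      simp [h1, h2]

-- once a run is finished (runs nonempty), its head is never touched again.
theorem rle_head_stable (r0 : Int × Int) (rs : List (Int × Int)) (cur cnt : Int) (xs : List Int) :
    ((xs.foldl rleStep (r0 :: rs, cur, cnt)).1 ++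
      [((xs.foldl rleStep (r0 :: rs, cur, cnt)).2.1, (xs.foldl rleStep (r0 :: rs, cur, cnt)).2.2)]).headD (0, 0) = r0 := by
  induction xs generalizing rs cur cnt with
  | nil => simp
  | cons x xs ih =>
    simp only [List.foldl_cons, rleStep]
    by_cases h : x = cur
    · rw [if_pos (by simp [h])]
      exact ih rs cur (cnt + 1)
    · rw [if_neg (by simpa using h)]
      exact ih (rs ++ [(cur, cnt)]) x 1

-- starting with no finished runs, the first run is (cur, cnt + leading count of cur).
theorem rle_first_run (cur cnt : Int) (xs : List Int) :
    ((xs.foldl rleStep ([], cur, cnt)).1 ++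
      [((xs.foldl rleStep ([], cur, cnt)).2.1, (xs.foldl rleStep ([], cur, cnt)).2.2)]).headD (0, 0)
      = (cur, cnt + ((xs.takeWhile (fun x => x == cur)).length : Int)) := by
  induction xs generalizing cnt with
  | nil => simp
  | cons x xs ih =>
    simp only [List.foldl_cons, rleStep, List.takeWhile]
    by_cases h : x = cur
    · subst h
      rw [if_pos (by simp)]
      simp only [beq_self_eq_true, ih]
      simp
      ring
    · rw [if_neg (by simpa using h)]
      have hb : (x == cur) = false := by simpa using h
      rw [List.nil_append, show ([(cur, cnt)] : List (Int × Int)) = (cur, cnt) :: [] from rfl,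
        rle_head_stable]
      simp [hb]

-- ===== VERDICT (by name: the statement is the Claim_ definition above) =====
theorem premier_plateau_spec : Claim_equal_premier_plateau := by
  intro tableau _ hpre
  unfold Spec_premier_plateau
  match tableau with
  | [] => exact absurd rfl hpre
  | tab :: rest =>
    show premier_plateau (tab :: rest) = premier_plateau_alt (tab :: rest)
    simp only [premier_plateau, premier_plateau_alt, premier_plateau_loop_eq,
      List.foldl_cons, rleStep, beq_self_eq_true, if_true]
    rw [rle_first_run]
    simp
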